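-- pv_equiv track=rewrite | github.com/Laki-b/Duplicate-Detection-Assignment | main_3.py | generate_ground_truth_pairs
-- ===== SOURCE A (Python) =====
-- def generate_ground_truth_pairs(products):
--     """Generate ground truth pairs based on duplicate modelIDs."""
--     ground_truth_pairs = set()
--     model_to_indices = {}
--
--     for index, product in enumerate(products):
--         model_id = product.get("modelID", None)
--         if model_id:
--             if model_id not in model_to_indices:
--                 model_to_indices[model_id] = []
--             model_to_indices[model_id].append(index)
--
--     for indices in model_to_indices.values():
--         if len(indices) > 1:
--             for i in range(len(indices)):
--                 for j in range(i + 1, len(indices)):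
--                     ground_truth_pairs.add((indices[i], indices[j]))
--
--     return ground_truth_pairs
-- ===== SOURCE B (Python) =====
-- def _pairs(indices):
--     """All ordered pairs (earlier, later) of a list, head-with-each-of-tail then recurse."""
--     if not indices:
--         return []
--     head, tail = indices[0], indices[1:]
--     return [(head, j) for j in tail] + _pairs(tail)
--
--
-- def generate_ground_truth_pairs(products):
--     """Generate ground truth pairs based on duplicate modelIDs."""
--     groups = {}
--     for index, product in enumerate(products):
--         model_id = product.get("modelID", None)
--         if model_id:
--             groups.setdefault(model_id, []).append(index)
--     return set(pair for indices in groups.values() for pair in _pairs(indices))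
-- ===== Notes on version B (the rewrite author's own statement) =====
-- stated objective: simpler
-- what changed: Pair generation is rewritten as structural recursion on each index group (head paired with every tail element, then recurse) flattened by a comprehension into one set() call, replacing A's len>1 guard, nested index ranges and incremental set.add; grouping uses dict.setdefault instead of A's membership test plus insert.
import Mathlib
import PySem

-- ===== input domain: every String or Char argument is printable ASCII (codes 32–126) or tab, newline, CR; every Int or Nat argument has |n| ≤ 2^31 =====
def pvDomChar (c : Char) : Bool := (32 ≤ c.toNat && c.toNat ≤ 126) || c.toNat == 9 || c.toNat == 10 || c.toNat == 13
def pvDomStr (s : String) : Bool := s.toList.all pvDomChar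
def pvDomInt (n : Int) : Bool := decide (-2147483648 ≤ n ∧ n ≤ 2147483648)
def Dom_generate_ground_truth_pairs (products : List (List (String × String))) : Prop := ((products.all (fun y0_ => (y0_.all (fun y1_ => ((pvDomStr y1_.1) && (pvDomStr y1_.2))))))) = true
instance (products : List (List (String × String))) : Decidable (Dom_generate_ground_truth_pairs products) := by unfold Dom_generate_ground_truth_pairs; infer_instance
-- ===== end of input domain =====

-- ===== PORT A =====
-- B rewrites A's pair generation as structural recursion and a flat comprehension (simpler decomposition, same cost).
def generate_ground_truth_pairs (products : List (List (String × String))) : List (Int × Int) :=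
  let model_to_indices : PySem.Dict String (List Int) :=
    (PySem.List.enumerate products).foldl (fun d ip =>
      match (PySem.Dict.mk ip.2).get? "modelID" with
      | none => d
      | some model_id =>
        if model_id = "" then d
        else
          let d := if d.contains model_id then d else d.insert model_id []
          d.modify model_id [] (fun l => l ++ [ip.1])) PySem.Dict.empty
  (PySem.Dict.values model_to_indices).foldl (fun s indices =>
    if 1 < (indices.length : Int) then
      (PySem.List.pyRange 0 (indices.length : Int) 1).foldl (fun s i =>
        (PySem.List.pyRange (i + 1) (indices.length : Int) 1).foldl (fun s j =>
          PySem.Set.add s (PySem.List.pyGetD indices i 0, PySem.List.pyGetD indices j 0)) s) s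
    else s) PySem.Set.empty

-- ===== PORT B =====
-- helper for B: _pairs — head with each element of the tail, then recurse on the tail
def pvPairsRec : List Int → List (Int × Int)
  | [] => []
  | h :: t => t.map (fun j => (h, j)) ++ pvPairsRec t

def generate_ground_truth_pairs_alt (products : List (List (String × String))) : List (Int × Int) :=
  let groups : PySem.Dict String (List Int) :=
    (PySem.List.enumerate products).foldl (fun d ip =>
      match (PySem.Dict.mk ip.2).get? "modelID" with
      | none => d
      | some model_id =>
        if model_id = "" then d
        else (d.setdefault model_id []).modify model_id [] (fun l => l ++ [ip.1])) PySem.Dict.empty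
  PySem.Set.ofList ((PySem.Dict.values groups).flatMap pvPairsRec)

-- ===== PRECONDITION & SPEC =====
def Spec_generate_ground_truth_pairs (products : List (List (String × String))) (out : List (Int × Int)) : Prop := out = generate_ground_truth_pairs_alt products
instance (products : List (List (String × String))) (out : List (Int × Int)) : Decidable (Spec_generate_ground_truth_pairs products out) := by unfold Spec_generate_ground_truth_pairs; infer_instance

-- ===== CLAIM (what is proved, stated in full; the proofs are below) =====
def Claim_equal_generate_ground_truth_pairs : Prop := ∀ (products : List (List (String × String))), Dom_generate_ground_truth_pairs products → Spec_generate_ground_truth_pairs products (generate_ground_truth_pairs products)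

-- ===== LEMMAS AND PROOFS =====

-- the two phase-1 grouping loops build the same dict (A's membership test + insert IS setdefault)
theorem pv_phase1_eq (products : List (List (String × String))) :
    (PySem.List.enumerate products).foldl (fun d ip =>
      match (PySem.Dict.mk ip.2).get? "modelID" with
      | none => d
      | some model_id =>
        if model_id = "" then d
        else
          let d := if d.contains model_id then d else d.insert model_id []
          d.modify model_id [] (fun l => l ++ [ip.1])) PySem.Dict.empty
    = (PySem.List.enumerate products).foldl (fun d ip =>
      match (PySem.Dict.mk ip.2).get? "modelID" with
      | none => d
      | some model_id =>
        if model_id = "" then d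
        else (d.setdefault model_id []).modify model_id [] (fun l => l ++ [ip.1])) PySem.Dict.empty := by
  apply PySem.List.foldl_congr_mem
  intro d ip _
  cases h : (PySem.Dict.mk ip.2).get? "modelID" with
  | none => rfl
  | some mid =>
    by_cases hm : mid = ""
    · simp [hm]
    · by_cases hc : d.contains mid
      · simp [hm, hc, PySem.Dict.setdefault_of_contains _ _ hc]
      · simp only [Bool.not_eq_true] at hc
        simp [hm, hc, PySem.Dict.setdefault_of_not_contains _ _ hc]

-- A's inner j-loop over range(i+1, n) is a fold of Set.add over the mapped tail
theorem pv_inner_eq (xs : List Int) (i : Int) (s : PySem.Set (Int × Int)) (hi : 0 ≤ i) :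
    (PySem.List.pyRange (i + 1) (xs.length : Int) 1).foldl (fun s j =>
        PySem.Set.add s (PySem.List.pyGetD xs i 0, PySem.List.pyGetD xs j 0)) s
    = ((xs.drop (i + 1).toNat).map (fun y => (PySem.List.pyGetD xs i 0, y))).foldl PySem.Set.add s := by
  rw [PySem.List.foldl_pyRange_pyGetD' xs 0
      (f := fun s y => PySem.Set.add s (PySem.List.pyGetD xs i 0, y)) (init := s) (a := i + 1) (by omega)]
  rw [List.foldl_map]

-- A's double range loop over indices equals the recursive pair list, folded into the set
theorem pv_outer_eq (xs : List Int) (s : PySem.Set (Int × Int)) :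
    (PySem.List.pyRange 0 (xs.length : Int) 1).foldl (fun s i =>
      (PySem.List.pyRange (i + 1) (xs.length : Int) 1).foldl (fun s j =>
        PySem.Set.add s (PySem.List.pyGetD xs i 0, PySem.List.pyGetD xs j 0)) s) s
    = (pvPairsRec xs).foldl PySem.Set.add s := by
  induction xs generalizing s with
  | nil => simp [pvPairsRec, PySem.List.pyRange_one_eq_nil]
  | cons x t ih =>
    have hlen : ((x :: t).length : Int) = (t.length : Int) + 1 := by push_cast [List.length_cons]; ring
    rw [PySem.List.pyRange_one_cons (by simp)]
    simp only [List.foldl_cons]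
    rw [pv_inner_eq _ _ _ (le_refl 0)]
    have hdrop : (x :: t).drop ((0 : Int) + 1).toNat = t := by simp
    have hget0 : PySem.List.pyGetD (x :: t) 0 0 = x := PySem.List.pyGetD_zero_cons _ _ _
    rw [hdrop, hget0]
    -- shift the remaining outer range [1, n+1) to [0, n) over the tail
    have hshift :
        (PySem.List.pyRange (0 + 1) ((x :: t).length : Int) 1).foldl (fun s i =>
          (PySem.List.pyRange (i + 1) (((x :: t).length : Int)) 1).foldl (fun s j =>
            PySem.Set.add s (PySem.List.pyGetD (x :: t) i 0, PySem.List.pyGetD (x :: t) j 0)) s)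
          ((t.map (fun y => (x, y))).foldl PySem.Set.add s)
        = (PySem.List.pyRange 0 ((t.length : Int)) 1).foldl (fun s i =>
          (PySem.List.pyRange (i + 1) ((t.length : Int)) 1).foldl (fun s j =>
            PySem.Set.add s (PySem.List.pyGetD t i 0, PySem.List.pyGetD t j 0)) s)
          ((t.map (fun y => (x, y))).foldl PySem.Set.add s) := by
      rw [PySem.List.pyRange_one (0+1), PySem.List.pyRange_one 0]
      rw [List.foldl_map]
      conv_rhs => rw [List.foldl_map]
      have hn : (((x :: t).length : Int) - (0 + 1)).toNat = ((t.length : Int) - 0).toNat := by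
        simp [List.length_cons]
      rw [hn]
      apply PySem.List.foldl_congr_mem
      intro s' k hk
      have hk' : (k : Int) < (t.length : Int) := by
        have := List.mem_range.mp hk
        simp at this ⊢
        omega
      have hknn : (0 : Int) ≤ (k : Int) := by positivity
      rw [pv_inner_eq _ _ _ (by omega), pv_inner_eq _ _ _ (by omega)]
      have h1 : (0 + 1 + (k : Int) + 1).toNat = k + 2 := by omega
      have h2 : (0 + (k : Int) + 1).toNat = k + 1 := by omega
      have h3 : PySem.List.pyGetD (x :: t) (0 + 1 + (k : Int)) 0 = PySem.List.pyGetD t (0 + (k : Int)) 0 := by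
        have : (0 : Int) + 1 + (k : Int) = ((k + 1 : Nat) : Int) := by omega
        rw [this, PySem.List.pyGetD_natCast]
        have : (0 : Int) + (k : Int) = ((k : Nat) : Int) := by omega
        rw [this, PySem.List.pyGetD_natCast]
        simp
      rw [h1, h2, h3]
      simp [List.drop_succ_cons]
    rw [hshift, ih]
    simp [pvPairsRec, List.foldl_append, List.foldl_map]

-- pairsRec of a short list is empty, so A's len > 1 guard is invisible
theorem pv_pairsRec_short (xs : List Int) (h : ¬ (1 : Int) < (xs.length : Int)) : pvPairsRec xs = [] := by
  match xs with
  | [] => rfl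
  | [a] => rfl
  | a :: b :: t => simp at h

-- ===== VERDICT (by name: the statement is the Claim_ definition above) =====
theorem generate_ground_truth_pairs_spec : Claim_equal_generate_ground_truth_pairs := by
  intro products _
  show generate_ground_truth_pairs products = generate_ground_truth_pairs_alt products
  simp only [generate_ground_truth_pairs, generate_ground_truth_pairs_alt]
  rw [pv_phase1_eq]
  rw [PySem.Set.ofList_eq_foldl, List.foldl_flatMap]
  apply PySem.List.foldl_congr_mem
  intro s idx _
  by_cases h : (1 : Int) < (idx.length : Int)
  · simp only [h, if_true]
    exact pv_outer_eq idx s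
  · simp only [h, if_false]
    rw [pv_pairsRec_short idx h]
    rfl
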